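-- pv_equiv track=rewrite | github.com/AnishAdkikar/CN-lab | hamming_code.py | detect_error_hamming_code
-- ===== SOURCE A (Python) =====
-- def detect_error_hamming_code(hamming_code):
--     # Calculate the number of parity bits used in the Hamming code
--     parity_bits = 0
--     while 2**parity_bits < len(hamming_code):
--         parity_bits += 1
--
--     error_bits = []  # Track the positions of the error bits
--     for i in range(parity_bits):
--         parity_index = 2**i - 1
--         parity_value = 0
--         for j in range(len(hamming_code)):
--             if j & (2**i - 1) != parity_index and hamming_code[j] == 1:
--                 parity_value ^= 1
--         if parity_value != hamming_code[parity_index]: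
--             error_bits.append(parity_index + 1)
--
--     return error_bits
-- ===== SOURCE B (Python) =====
-- def detect_error_hamming_code(hamming_code):
--     # One global parity pass plus stride-2^i sweeps: O(n) total instead of O(n log n).
--     n = len(hamming_code)
--     total = 0
--     for x in hamming_code:
--         if x == 1:
--             total += 1
--     total &= 1
--     error_bits = []
--     step = 1
--     while step < n:
--         masked = 0
--         j = step - 1
--         while j < n:
--             if hamming_code[j] == 1:
--                 masked ^= 1
--             j += step
--         if (total ^ masked) != hamming_code[step - 1]:
--             error_bits.append(step)
--         step *= 2
--     return error_bits
-- ===== Notes on version B (the rewrite author's own statement) =====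
-- stated objective: faster
-- what changed: Instead of scanning the whole list once per parity level, B computes the global ones-parity once and then per level XORs only the stride-2^i positions (j % 2^i == 2^i-1), recovering each level's check as total XOR masked.
import Mathlib
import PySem

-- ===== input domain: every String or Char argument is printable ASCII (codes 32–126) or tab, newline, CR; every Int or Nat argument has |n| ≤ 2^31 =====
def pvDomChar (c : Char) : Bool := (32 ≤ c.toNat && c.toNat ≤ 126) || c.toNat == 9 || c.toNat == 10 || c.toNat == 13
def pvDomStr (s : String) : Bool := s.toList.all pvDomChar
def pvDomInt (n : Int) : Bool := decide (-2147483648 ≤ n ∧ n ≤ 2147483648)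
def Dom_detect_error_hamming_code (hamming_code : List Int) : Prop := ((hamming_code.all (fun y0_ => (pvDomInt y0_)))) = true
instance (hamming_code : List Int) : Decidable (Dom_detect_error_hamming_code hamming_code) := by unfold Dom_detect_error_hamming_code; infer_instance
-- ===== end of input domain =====

-- B replaces A's per-parity-level full scan by one global parity pass plus stride-2^i sweeps (objective: faster, asymptotic).

-- ===== PORT A =====
-- the 'while 2**parity_bits < len(...)' loop
def pbitsA (n p : Nat) : Nat :=
  if 2 ^ p < n then pbitsA n (p + 1) else p
termination_by n - 2 ^ p
decreasing_by
  have h2 : 2 ^ p < 2 ^ (p + 1) := Nat.pow_lt_pow_right (by norm_num) (Nat.lt_succ_self p)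
  omega

-- body of A's 'for i in range(parity_bits)' loop
def aBody (hamming_code : List Int) (error_bits : List Int) (i : Nat) : List Int :=
  let parity_index := 2 ^ i - 1
  let parity_value := (List.range hamming_code.length).foldl (fun (pv : Nat) j =>
    if j &&& (2 ^ i - 1) ≠ parity_index ∧ hamming_code.getD j 0 = 1 then pv ^^^ 1 else pv) 0
  if (parity_value : Int) ≠ hamming_code.getD parity_index 0 then
    error_bits ++ [(parity_index : Int) + 1]
  else error_bits

def detect_error_hamming_code (hamming_code : List Int) : List Int :=
  let parity_bits := pbitsA hamming_code.length 0
  (List.range parity_bits).foldl (aBody hamming_code) []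

-- ===== PORT B =====
-- Source B's inner 'while j < n' stride sweep
def altMasked (hamming_code : List Int) (n step : Nat) (hs : 0 < step) (j m : Nat) : Nat :=
  if _h : j < n then
    altMasked hamming_code n step hs (j + step) (if hamming_code.getD j 0 = 1 then m ^^^ 1 else m)
  else m
termination_by n - j

-- Source B's outer 'while step < n' loop
def altLoop (hamming_code : List Int) (n total step : Nat) (hs : 0 < step) (error_bits : List Int) : List Int :=
  if _h : step < n then
    let masked := altMasked hamming_code n step hs (step - 1) 0
    altLoop hamming_code n total (step * 2) (by omega)
      (if ((total ^^^ masked : Nat) : Int) ≠ hamming_code.getD (step - 1) 0 then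
        error_bits ++ [(step : Int)]
      else error_bits)
  else error_bits
termination_by n - step

def detect_error_hamming_code_alt (hamming_code : List Int) : List Int :=
  let n := hamming_code.length
  let total := (hamming_code.foldl (fun a x => if x = 1 then a + 1 else a) 0) &&& 1
  altLoop hamming_code n total 1 (by omega) []

-- ===== PRECONDITION & SPEC =====
def Spec_detect_error_hamming_code (hamming_code : List Int) (out : List Int) : Prop := out = detect_error_hamming_code_alt hamming_code
instance (hamming_code : List Int) (out : List Int) : Decidable (Spec_detect_error_hamming_code hamming_code out) := by unfold Spec_detect_error_hamming_code; infer_instance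

-- ===== CLAIM (what is proved, stated in full; the proofs are below) =====
def Claim_equal_detect_error_hamming_code : Prop := ∀ (hamming_code : List Int), Dom_detect_error_hamming_code hamming_code → Spec_detect_error_hamming_code hamming_code (detect_error_hamming_code hamming_code)

-- ===== LEMMAS AND PROOFS =====

-- parity-toggle fold = countP % 2
theorem foldl_xor_toggle (p : Nat → Prop) [DecidablePred p] (l : List Nat) (a : Nat) :
    l.foldl (fun pv j => if p j then pv ^^^ 1 else pv) a = a ^^^ (l.countP (fun j => decide (p j))) % 2 := by
  induction l generalizing a with
  | nil => simp
  | cons x xs ih =>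
    simp only [List.foldl_cons, List.countP_cons, ih]
    by_cases hx : p x <;> simp [hx, Nat.xor_assoc]
    rcases Nat.mod_two_eq_zero_or_one (xs.countP (fun j => decide (p j))) with h | h <;>
      · rw [Nat.add_mod, h]; rfl

-- Bool-level countP lemmas
theorem countP_bool_split (f g : Nat → Bool) (l : List Nat) :
    l.countP (fun a => !f a && g a) + l.countP (fun a => f a && g a) = l.countP g := by
  induction l with
  | nil => simp
  | cons x xs ih =>
    simp only [List.countP_cons]
    cases hf : f x <;> cases hg : g x <;> simp [hf, hg] <;> omega

theorem countP_bool_or (f g : Nat → Bool) (l : List Nat) (h : ∀ a, ¬(f a = true ∧ g a = true)) :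
    l.countP (fun a => f a || g a) = l.countP f + l.countP g := by
  induction l with
  | nil => simp
  | cons x xs ih =>
    simp only [List.countP_cons, ih]
    cases hf : f x
    · cases hg : g x <;> simp [hf, hg] <;> omega
    · cases hg : g x
      · simp [hf, hg]; omega
      · exact absurd ⟨hf, hg⟩ (h x)

-- split a countP by a decidable side condition
theorem countP_split (c p : Nat → Prop) [DecidablePred c] [DecidablePred p] (l : List Nat) :
    l.countP (fun a => decide (¬ c a ∧ p a)) + l.countP (fun a => decide (c a ∧ p a))
      = l.countP (fun a => decide (p a)) := by
  simp only [Bool.decide_and, decide_not]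
  exact countP_bool_split (fun a => decide (c a)) (fun a => decide (p a)) l

-- countP of an equality-pinned predicate
theorem countP_eq_point (j : Nat) (p : Nat → Prop) [DecidablePred p] (l : List Nat) :
    l.countP (fun k => decide (k = j ∧ p k)) = if p j then l.count j else 0 := by
  induction l with
  | nil => simp
  | cons x xs ih =>
    simp only [List.countP_cons, List.count_cons, ih]
    by_cases hx : x = j
    · subst hx; by_cases hp : p x <;> simp [hp]
    · by_cases hp : p j <;> simp [hx, hp]

theorem count_range (j n : Nat) : (List.range n).count j = if j < n then 1 else 0 := by
  by_cases h : j < n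
  · simp [h, List.count_eq_one_of_mem (List.nodup_range) (List.mem_range.mpr h)]
  · simp [h, List.count_eq_zero_of_not_mem (fun hm => h (List.mem_range.mp hm))]

-- progression-membership vs mod characterisation
theorem stride_mem_iff (s k : Nat) (hs : 0 < s) :
    (s - 1 ≤ k ∧ s ∣ (k - (s - 1))) ↔ k % s = s - 1 := by
  constructor
  · rintro ⟨hle, q, hq⟩
    have hk : k = s * q + (s - 1) := by omega
    rw [hk, Nat.mul_add_mod]
    exact Nat.mod_eq_of_lt (by omega)
  · intro h
    have hd := Nat.div_add_mod k s
    refine ⟨by omega, k / s, by omega⟩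

-- one step of the stride predicate
theorem stride_pred_step (s j k : Nat) (hs : 0 < s) (one : Nat → Prop) :
    (j ≤ k ∧ s ∣ (k - j) ∧ one k) ↔
      ((j + s ≤ k ∧ s ∣ (k - (j + s)) ∧ one k) ∨ (k = j ∧ one j)) := by
  constructor
  · rintro ⟨hle, ⟨q, hq⟩, ho⟩
    by_cases hkj : k = j
    · exact Or.inr ⟨hkj, hkj ▸ ho⟩
    · left
      cases q with
      | zero => omega
      | succ q' =>
        have hms : s * (q' + 1) = s * q' + s := Nat.mul_succ s q'
        exact ⟨by omega, ⟨q', by omega⟩, ho⟩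
  · rintro (⟨hle, ⟨q, hq⟩, ho⟩ | ⟨hk, ho⟩)
    · have hms : s * (q + 1) = s * q + s := Nat.mul_succ s q
      exact ⟨by omega, ⟨q + 1, by omega⟩, ho⟩
    · exact ⟨by omega, ⟨0, by omega⟩, hk ▸ ho⟩

-- altMasked computes the parity of the ones on the arithmetic progression
theorem altMasked_eq (code : List Int) (n s : Nat) (hs : 0 < s) (j m : Nat) :
    altMasked code n s hs j m
      = m ^^^ ((List.range n).countP
          (fun k => decide (j ≤ k ∧ s ∣ (k - j) ∧ code.getD k 0 = 1))) % 2 := by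
  induction j, m using altMasked.induct code n s hs with
  | case1 j m hlt ih =>
    rw [altMasked]; simp only [hlt, dif_pos]
    simp only [dite_eq_ite] at ih
    rw [ih]
    have hsplit : ((List.range n).countP (fun k => decide (j ≤ k ∧ s ∣ (k - j) ∧ code.getD k 0 = 1)))
        = ((List.range n).countP (fun k => decide (j + s ≤ k ∧ s ∣ (k - (j + s)) ∧ code.getD k 0 = 1)))
          + (if code.getD j 0 = 1 then 1 else 0) := by
      have h1 : ((List.range n).countP (fun k => decide (j ≤ k ∧ s ∣ (k - j) ∧ code.getD k 0 = 1)))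
          = ((List.range n).countP (fun k =>
              (decide (j + s ≤ k ∧ s ∣ (k - (j + s)) ∧ code.getD k 0 = 1)
                || decide (k = j ∧ code.getD j 0 = 1)))) := by
        apply List.countP_congr
        intro k _
        rw [← Bool.decide_or]
        simp only [decide_eq_true_eq]
        exact stride_pred_step s j k hs (fun k => code.getD k 0 = 1)
      have h2 : ((List.range n).countP (fun k =>
              (decide (j + s ≤ k ∧ s ∣ (k - (j + s)) ∧ code.getD k 0 = 1)
                || decide (k = j ∧ code.getD j 0 = 1))))
          = ((List.range n).countP (fun k => decide (j + s ≤ k ∧ s ∣ (k - (j + s)) ∧ code.getD k 0 = 1)))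
            + ((List.range n).countP (fun k => decide (k = j ∧ code.getD j 0 = 1))) :=
        countP_bool_or _ _ _ (by
          intro a ⟨ha, hb⟩
          simp only [decide_eq_true_eq] at ha hb
          omega)
      have h3 : ((List.range n).countP (fun k => decide (k = j ∧ code.getD j 0 = 1)))
          = if code.getD j 0 = 1 then 1 else 0 := by
        rw [countP_eq_point j (fun _ => code.getD j 0 = 1), count_range]
        by_cases h : code.getD j 0 = 1 <;> simp [hlt]
      omega
    rw [hsplit]
    by_cases hone : code.getD j 0 = 1 <;> simp only [hone, if_true, if_false]
    · rw [Nat.xor_assoc]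
      congr 1
      rcases Nat.mod_two_eq_zero_or_one ((List.range n).countP (fun k => decide (j + s ≤ k ∧ s ∣ (k - (j + s)) ∧ code.getD k 0 = 1))) with h | h <;>
        · rw [Nat.add_mod, h]; rfl
    · simp
  | case2 j m hlt =>
    rw [altMasked]; simp only [hlt, dif_neg, not_false_iff]
    have : ((List.range n).countP (fun k => decide (j ≤ k ∧ s ∣ (k - j) ∧ code.getD k 0 = 1))) = 0 := by
      rw [List.countP_eq_zero]
      intro k hk
      simp only [decide_eq_true_eq, not_and]
      intro hjk
      exact absurd (lt_of_lt_of_le (List.mem_range.mp hk) (by omega : n ≤ k)) (by omega)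
    rw [this]
    simp

-- pbits characterisation: 2^i < n ↔ i < pbitsA n 0
theorem pbitsA_le (n p : Nat) : p ≤ pbitsA n p := by
  induction p using pbitsA.induct n with
  | case1 p h ih => rw [pbitsA]; simp only [h, if_pos]; omega
  | case2 p h => rw [pbitsA]; simp [h]

theorem lt_pbitsA_of (n p i : Nat) (hpi : p ≤ i) (hi : 2 ^ i < n) : i < pbitsA n p := by
  induction p using pbitsA.induct n with
  | case1 p h ih =>
    rw [pbitsA]; simp only [h, if_pos]
    rcases Nat.eq_or_lt_of_le hpi with rfl | hlt
    · exact lt_of_lt_of_le (Nat.lt_succ_self p) (pbitsA_le n (p + 1))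
    · exact ih (by omega)
  | case2 p h =>
    exfalso
    have : 2 ^ p ≤ 2 ^ i := Nat.pow_le_pow_right (by norm_num) hpi
    omega

theorem pow_lt_of_lt_pbitsA (n p i : Nat) (hpi : p ≤ i) (hi : i < pbitsA n p) : 2 ^ i < n := by
  induction p using pbitsA.induct n with
  | case1 p h ih =>
    rcases Nat.eq_or_lt_of_le hpi with rfl | hlt
    · exact h
    · exact ih (by omega) (by rw [pbitsA] at hi; simpa [h] using hi)
  | case2 p h =>
    rw [pbitsA] at hi; simp only [h, if_neg, not_false_iff] at hi; omega

-- the alt 'total' accumulator equals the countP over indices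
theorem foldl_count_ones (code : List Int) (a : Nat) :
    code.foldl (fun a x => if x = 1 then a + 1 else a) a
      = a + (List.range code.length).countP (fun j => decide (code.getD j 0 = 1)) := by
  induction code generalizing a with
  | nil => simp
  | cons x xs ih =>
    simp only [List.foldl_cons, List.length_cons, List.range_succ_eq_map, List.countP_cons,
      List.countP_map]
    rw [ih]
    have : (List.range xs.length).countP ((fun j => decide ((x :: xs).getD j 0 = 1)) ∘ (· + 1))
        = (List.range xs.length).countP (fun j => decide (xs.getD j 0 = 1)) := by
      apply List.countP_congr; intro k _; rfl
    rw [this]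
    by_cases hx : x = 1 <;> simp [hx] <;> omega

-- xor/mod-2 arithmetic glue
theorem mod_two_xor (x y : Nat) : ((x + y) % 2) ^^^ (y % 2) = x % 2 := by
  rcases Nat.mod_two_eq_zero_or_one x with hx | hx <;>
    rcases Nat.mod_two_eq_zero_or_one y with hy | hy <;>
      rw [Nat.add_mod, hx, hy] <;> simp

-- the main loop alignment: altLoop at step 2^i matches A's fold over the remaining levels
theorem altLoop_eq (code : List Int) (i : Nat) (acc : List Int) :
    altLoop code code.length
        (((List.range code.length).countP (fun j => decide (code.getD j 0 = 1))) % 2)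
        (2 ^ i) (Nat.two_pow_pos i) acc
      = (List.range' i (pbitsA code.length 0 - i)).foldl (aBody code) acc := by
  set n := code.length with hn
  set total := ((List.range n).countP (fun j => decide (code.getD j 0 = 1))) % 2 with htot
  induction hd : pbitsA n 0 - i generalizing i acc with
  | zero =>
    have hnot : ¬ 2 ^ i < n := fun h => by
      have := lt_pbitsA_of n 0 i (Nat.zero_le i) h; omega
    rw [altLoop]; simp [hnot, hd]
  | succ d ih =>
    have hilt : i < pbitsA n 0 := by omega
    have hlt : 2 ^ i < n := pow_lt_of_lt_pbitsA n 0 i (Nat.zero_le i) hilt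
    rw [altLoop]
    simp only [hlt, dif_pos]
    have hstep : 2 ^ i * 2 = 2 ^ (i + 1) := by rw [Nat.pow_succ]
    rw [List.range'_succ, List.foldl_cons]
    have hbody : (if (((total ^^^ altMasked code n (2 ^ i) (Nat.two_pow_pos i) (2 ^ i - 1) 0 : Nat) : Int)
          ≠ code.getD (2 ^ i - 1) 0) then acc ++ [((2 ^ i : Nat) : Int)] else acc)
        = aBody code acc i := by
      simp only [aBody]
      have hpow : 0 < 2 ^ i := Nat.two_pow_pos i
      -- the stride parity
      rw [altMasked_eq]
      rw [Nat.zero_xor]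
      -- A's inner fold
      rw [foldl_xor_toggle (fun j => j &&& (2 ^ i - 1) ≠ 2 ^ i - 1 ∧ code.getD j 0 = 1)]
      rw [Nat.zero_xor]
      -- identify the side conditions
      have hcond : ∀ k, (2 ^ i - 1 ≤ k ∧ 2 ^ i ∣ (k - (2 ^ i - 1))) ↔ (k &&& (2 ^ i - 1) = 2 ^ i - 1) := by
        intro k
        rw [Nat.and_two_pow_sub_one_eq_mod]
        exact stride_mem_iff (2 ^ i) k hpow
      have hM : ((List.range n).countP (fun k => decide (2 ^ i - 1 ≤ k ∧ 2 ^ i ∣ (k - (2 ^ i - 1)) ∧ code.getD k 0 = 1)))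
          = ((List.range n).countP (fun k => decide ((k &&& (2 ^ i - 1) = 2 ^ i - 1) ∧ code.getD k 0 = 1))) := by
        apply List.countP_congr; intro k _
        simp only [decide_eq_true_eq]
        constructor
        · rintro ⟨h1, h2, h3⟩; exact ⟨(hcond k).mp ⟨h1, h2⟩, h3⟩
        · rintro ⟨h1, h3⟩; obtain ⟨a, b⟩ := (hcond k).mpr h1; exact ⟨a, b, h3⟩
      rw [hM]
      have hsplit := countP_split (fun k => k &&& (2 ^ i - 1) = 2 ^ i - 1)
        (fun k => code.getD k 0 = 1) (List.range n)
      have hxor : total ^^^ ((List.range n).countP (fun k => decide ((k &&& (2 ^ i - 1) = 2 ^ i - 1) ∧ code.getD k 0 = 1))) % 2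
          = ((List.range n).countP (fun k => decide (¬ (k &&& (2 ^ i - 1) = 2 ^ i - 1) ∧ code.getD k 0 = 1))) % 2 := by
        rw [htot, ← hsplit]
        exact mod_two_xor _ _
      rw [hxor]
      have hcast : ((2 ^ i : Nat) : Int) = ((2 ^ i - 1 : Nat) : Int) + 1 := by
        have : (2 ^ i - 1 : Nat) + 1 = 2 ^ i := by omega
        rw [← this]; push_cast; ring
      rw [hcast]
    rw [hbody]
    simp only [hstep]
    exact ih (i + 1) _ (by omega)

-- ===== VERDICT (by name: the statement is the Claim_ definition above) =====
theorem detect_error_hamming_code_spec : Claim_equal_detect_error_hamming_code := by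
  intro code _
  unfold Spec_detect_error_hamming_code detect_error_hamming_code detect_error_hamming_code_alt
  rw [foldl_count_ones, Nat.zero_add, Nat.and_one_is_mod]
  have h := altLoop_eq code 0 []
  simp only [pow_zero] at h
  rw [h]
  simp [List.range_eq_range']
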